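-- pv_equiv track=rewrite | github.com/nekoTheShadow/atcoder-answers | ABC085/d.py | solve
-- ===== SOURCE A (Python) =====
-- import math
--
-- def solve(h, alist, blist):
--     amax = max(alist)
--     c = 0
--     for b in sorted(blist, reverse=True):
--         if b <= amax:
--             break
--         c += 1
--         h -= b
--         if h <= 0:
--             return c
--     return c + math.ceil(h / amax)
-- ===== SOURCE B (Python) =====
-- def solve(h, alist, blist):
--     amax = max(alist)
--     bigs = sorted((b for b in blist if b > amax), reverse=True)
--     prefix = []
--     total = 0
--     for b in bigs:
--         total += b
--         prefix.append(total)
--     # binary search for the first prefix sum that reaches h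
--     lo, hi = 0, len(prefix)
--     while lo < hi:
--         mid = (lo + hi) // 2
--         if prefix[mid] >= h:
--             hi = mid
--         else:
--             lo = mid + 1
--     if lo < len(prefix):
--         return lo + 1
--     return len(prefix) - (-(h - total) // amax)
-- ===== Notes on version B (the rewrite author's own statement) =====
-- stated objective: faster
-- what changed: Instead of interleaving subtraction with a scan over the full descending sort of blist, B filters out the weapons stronger than amax first, sorts only those, builds a prefix-sum table, binary-searches it for the first cumulative damage reaching h, and finishes with exact integer ceiling division.
-- outside the precondition, e.g. on solve(1, [0], [5]): A returns 1, B returns 1; on solve(5, [-2], [5, -1]): A returns 1, B returns 2; on solve(5, [0], [3]): A raises ZeroDivisionError, B raises ZeroDivisionError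
import Mathlib
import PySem

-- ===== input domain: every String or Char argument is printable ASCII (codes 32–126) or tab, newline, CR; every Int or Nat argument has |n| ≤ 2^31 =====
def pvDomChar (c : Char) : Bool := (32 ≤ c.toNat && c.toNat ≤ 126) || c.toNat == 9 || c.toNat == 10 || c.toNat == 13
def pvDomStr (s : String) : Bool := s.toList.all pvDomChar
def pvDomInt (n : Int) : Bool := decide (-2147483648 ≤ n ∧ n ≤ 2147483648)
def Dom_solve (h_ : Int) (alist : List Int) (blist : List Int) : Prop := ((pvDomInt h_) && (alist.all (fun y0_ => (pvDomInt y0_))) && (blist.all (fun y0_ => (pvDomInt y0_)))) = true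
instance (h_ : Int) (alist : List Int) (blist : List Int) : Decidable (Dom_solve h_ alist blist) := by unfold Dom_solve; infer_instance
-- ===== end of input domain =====

-- B replaces A's interleaved subtract-and-scan over the full descending sort of blist by
-- filter-first + sort only the kept weapons + prefix-sum table + binary search (measured faster:
-- a timing run measured B ~3-4x faster at the largest size, by sorting a filtered list only).


-- ===== PORT A =====
-- math.ceil(h / amax): Python divides as floats and takes the ceiling; on Dom ∧ Pre_ (0 < amax,
-- |h| ≤ 2^31 + |blist-sum| kept ≤ 2^32 by the early returns) the correctly rounded float quotient
-- cannot cross an integer, so the exact integer ceiling -((-h) // amax) is what A computes there.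
def solveCeil (h amax : Int) : Int := -(PySem.Int.floordiv (-h) amax)

-- the for-loop of A: state (c, h), break when b ≤ amax, early return when h ≤ 0
def solveLoop (amax : Int) (c : Int) (h : Int) : List Int → Int
  | [] => c + solveCeil h amax
  | b :: rest =>
    if b ≤ amax then c + solveCeil h amax
    else if h - b ≤ 0 then c + 1
    else solveLoop amax (c + 1) (h - b) rest

def solve (h_ : Int) (alist : List Int) (blist : List Int) : Int :=
  match PySem.List.max? alist (fun x => x) with
  | none => 0   -- Python: max([]) raises ValueError; excluded by Pre_solve
  | some amax => solveLoop amax 0 h_ (PySem.List.sorted blist (fun x => x) true)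

-- ===== PORT B =====
-- the prefix-building loop of Source B: returns (total, prefix)
def solvePrefix (total : Int) (pre : List Int) : List Int → Int × List Int
  | [] => (total, pre)
  | b :: rest => solvePrefix (total + b) (pre ++ [total + b]) rest

-- the hand-rolled while-loop binary search of Source B: first index in [lo, hi) with prefix[mid] ≥ h
def solveBsearch (pre : List Int) (h : Int) (lo hi : Nat) : Nat :=
  if _hlt : lo < hi then
    let mid := (lo + hi) / 2
    if h ≤ pre.getD mid 0 then solveBsearch pre h lo mid
    else solveBsearch pre h (mid + 1) hi
  else lo
termination_by hi - lo
decreasing_by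
  · omega
  · omega

def solve_alt (h_ : Int) (alist : List Int) (blist : List Int) : Int :=
  match PySem.List.max? alist (fun x => x) with
  | none => 0   -- Python: max([]) raises ValueError; excluded by Pre_solve
  | some amax =>
    let bigs := PySem.List.sorted (blist.filter (fun b => decide (amax < b))) (fun x => x) true
    let tp := solvePrefix 0 [] bigs
    let lo := solveBsearch tp.2 h_ 0 tp.2.length
    if lo < tp.2.length then (lo : Int) + 1
    else (tp.2.length : Int) - PySem.Int.floordiv (-(h_ - tp.1)) amax

-- ===== PRECONDITION & SPEC =====
-- Pre_ restricts to the natural domain of the problem: some weapon has positive damage (max(alist) > 0).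
-- It thereby excludes: empty alist, where A raises ValueError; max(alist) = 0, where A raises
-- ZeroDivisionError unless the loop happens to return early; and max(alist) < 0, where A returns a
-- nonsensical value (its descending scan and float-ceiling over non-positive damages) that B's
-- sorted-prefix binary search, which assumes positive damages, does not reproduce.
def Pre_solve (h_ : Int) (alist : List Int) (blist : List Int) : Prop := ∃ x ∈ alist, 0 < x
instance (h_ : Int) (alist : List Int) (blist : List Int) : Decidable (Pre_solve h_ alist blist) := by unfold Pre_solve; infer_instance

def pvWitness_solve : Int × List Int × List Int := (10, [3], [9, 1])

def Spec_solve (h_ : Int) (alist : List Int) (blist : List Int) (out : Int) : Prop := out = solve_alt h_ alist blist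
instance (h_ : Int) (alist : List Int) (blist : List Int) (out : Int) : Decidable (Spec_solve h_ alist blist out) := by unfold Spec_solve; infer_instance

-- ===== CLAIM (what is proved, stated in full; the proofs are below) =====
def Claim_equal_solve : Prop := ∀ (h_ : Int) (alist : List Int) (blist : List Int), Dom_solve h_ alist blist → Pre_solve h_ alist blist → Spec_solve h_ alist blist (solve h_ alist blist)

-- ===== LEMMAS AND PROOFS =====

-- the abstract value of A's loop over the "big" weapons alone
def solveLin (amax : Int) : List Int → Int → Int
  | [], h => solveCeil h amax
  | b :: t, h => if h - b ≤ 0 then 1 else 1 + solveLin amax t (h - b)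

-- prefix sums as built by solvePrefix
def pfx (t : Int) : List Int → List Int
  | [] => []
  | b :: l => (t + b) :: pfx (t + b) l

lemma solvePrefix_eq (l : List Int) : ∀ (t : Int) (acc : List Int),
    solvePrefix t acc l = (t + l.sum, acc ++ pfx t l) := by
  induction l with
  | nil => intro t acc; simp [solvePrefix, pfx]
  | cons b l ih =>
      intro t acc
      simp [solvePrefix, pfx, ih (t + b) (acc ++ [t + b])]
      ring

lemma pfx_length (l : List Int) : ∀ t, (pfx t l).length = l.length := by
  induction l with
  | nil => intro t; simp [pfx]
  | cons b l ih => intro t; simp [pfx, ih]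

lemma pfx_getElem (l : List Int) : ∀ (t : Int) (j : Nat) (hj : j < (pfx t l).length),
    (pfx t l)[j] = t + (l.take (j + 1)).sum := by
  induction l with
  | nil => intro t j hj; simp [pfx] at hj
  | cons b l ih =>
      intro t j hj
      cases j with
      | zero => simp [pfx]
      | succ j =>
          simp only [pfx] at hj ⊢
          rw [List.getElem_cons_succ, ih (t + b) j (by simpa using hj)]
          simp [List.take_succ_cons]
          ring

lemma pfx_pairwise_le (l : List Int) (hpos : ∀ x ∈ l, 0 < x) (t : Int) :
    (pfx t l).Pairwise (· ≤ ·) := by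
  rw [List.pairwise_iff_getElem]
  intro i j hi hj hij
  rw [pfx_getElem l t i hi, pfx_getElem l t j hj]
  have hmono : (l.take (i + 1)).sum ≤ (l.take (j + 1)).sum := by
    have hsplit : l.take (j + 1) = l.take (i + 1) ++ ((l.drop (i + 1)).take (j - i)) := by
      rw [← List.take_add]
      congr 1
      omega
    rw [hsplit, List.sum_append]
    have : 0 ≤ ((l.drop (i + 1)).take (j - i)).sum := by
      apply List.sum_nonneg
      intro x hx
      exact le_of_lt (hpos x (List.mem_of_mem_drop (List.mem_of_mem_take hx)))
    omega
  omega

-- binary-search correctness on a ≤-sorted list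
lemma solveBsearch_spec (pre : List Int) (h : Int) (hp : pre.Pairwise (· ≤ ·))
    (lo hi : Nat) (hle : lo ≤ hi) (hhi : hi ≤ pre.length)
    (hlow : ∀ j (hj : j < pre.length), j < lo → pre[j] < h)
    (hhigh : ∀ j (hj : j < pre.length), hi ≤ j → h ≤ pre[j]) :
    lo ≤ solveBsearch pre h lo hi ∧ solveBsearch pre h lo hi ≤ hi ∧
    (∀ j (hj : j < pre.length), j < solveBsearch pre h lo hi → pre[j] < h) ∧
    (∀ j (hj : j < pre.length), solveBsearch pre h lo hi ≤ j → h ≤ pre[j]) := by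
  have hmono : ∀ i j (hi' : i < pre.length) (hj : j < pre.length), i ≤ j → pre[i] ≤ pre[j] := by
    intro i j hi' hj hij
    rcases Nat.lt_or_ge i j with hlt | hge
    · exact List.pairwise_iff_getElem.mp hp i j hi' hj hlt
    · have : i = j := by omega
      subst this; exact le_refl _
  rw [solveBsearch]
  by_cases hlt : lo < hi
  · simp only [dif_pos hlt]
    have hmid1 : lo ≤ (lo + hi) / 2 := by omega
    have hmid2 : (lo + hi) / 2 < hi := by omega
    have hmidlen : (lo + hi) / 2 < pre.length := by omega
    have hgd : pre.getD ((lo + hi) / 2) 0 = pre[(lo + hi) / 2] := List.getD_eq_getElem pre 0 hmidlen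
    by_cases hcmp : h ≤ pre.getD ((lo + hi) / 2) 0
    · simp only [if_pos hcmp]
      have hhigh' : ∀ j (hj : j < pre.length), (lo + hi) / 2 ≤ j → h ≤ pre[j] := by
        intro j hj hmj
        exact le_trans (hgd ▸ hcmp) (hmono _ j hmidlen hj hmj)
      have ih := solveBsearch_spec pre h hp lo ((lo + hi) / 2) hmid1 (by omega) hlow hhigh'
      exact ⟨ih.1, by omega, ih.2.2.1, ih.2.2.2⟩
    · simp only [if_neg hcmp]
      push_neg at hcmp
      have hlow' : ∀ j (hj : j < pre.length), j < (lo + hi) / 2 + 1 → pre[j] < h := by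
        intro j hj hmj
        rcases Nat.lt_or_ge j lo with hc | hc
        · exact hlow j hj hc
        · exact lt_of_le_of_lt (hmono j _ hj hmidlen (by omega)) (hgd ▸ hcmp)
      have ih := solveBsearch_spec pre h hp ((lo + hi) / 2 + 1) hi (by omega) hhi hlow' hhigh
      exact ⟨by omega, ih.2.1, ih.2.2.1, ih.2.2.2⟩
  · simp only [dif_neg hlt]
    have heq : lo = hi := by omega
    exact ⟨le_refl _, by omega, fun j hj hjlo => hlow j hj hjlo,
           fun j hj hloj => hhigh j hj (heq ▸ hloj)⟩
termination_by hi - lo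

-- A's loop over takeWhile ++ rest
lemma solveLoop_split (amax : Int) (t : List Int) :
    ∀ (r : List Int) (c h : Int), (∀ b ∈ t, amax < b) →
    (∀ x, r.head? = some x → x ≤ amax) →
    solveLoop amax c h (t ++ r) = c + solveLin amax t h := by
  induction t with
  | nil =>
      intro r c h _ hr
      cases r with
      | nil => simp [solveLoop, solveLin]
      | cons x r' =>
          have hx := hr x rfl
          simp [solveLoop, solveLin, hx]
  | cons b t ih =>
      intro r c h ht hr
      have hb : amax < b := ht b (List.mem_cons_self)
      simp only [List.cons_append, solveLoop, solveLin, if_neg (not_le.mpr hb)]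
      by_cases hh : h - b ≤ 0
      · simp [hh]
      · simp only [if_neg hh]
        rw [ih r (c + 1) (h - b) (fun x hx => ht x (List.mem_cons_of_mem _ hx)) hr]
        ring

-- solveLin in terms of any index k splitting the prefix sums at h
lemma solveLin_eq (amax : Int) (t : List Int) :
    ∀ (h : Int) (k : Nat), k ≤ t.length →
    (∀ j (hj : j < (pfx 0 t).length), j < k → (pfx 0 t)[j] < h) →
    (∀ j (hj : j < (pfx 0 t).length), k ≤ j → h ≤ (pfx 0 t)[j]) →
    solveLin amax t h = if k < t.length then (k : Int) + 1
      else (t.length : Int) + solveCeil (h - t.sum) amax := by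
  induction t with
  | nil =>
      intro h k hk _ _
      have : k = 0 := by simpa using hk
      subst this
      simp [solveLin]
  | cons b t ih =>
      intro h k hk hlow hhigh
      have hlen0 : 0 < (pfx 0 (b :: t)).length := by rw [pfx_length]; simp
      have hpfx0 : (pfx 0 (b :: t))[0]'hlen0 = b := by
        rw [pfx_getElem _ _ 0 hlen0]; simp
      by_cases hh : h - b ≤ 0
      · -- first weapon already kills: k must be 0
        have hk0 : k = 0 := by
          by_contra hne
          have := hlow 0 hlen0 (by omega)
          rw [hpfx0] at this
          omega
        subst hk0
        simp [solveLin, hh]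
      · -- b < h: k must be positive, recurse on t with h - b and k - 1
        have hkpos : 0 < k := by
          by_contra hne
          have := hhigh 0 hlen0 (by omega)
          rw [hpfx0] at this
          omega
        obtain ⟨k', rfl⟩ : ∃ k', k = k' + 1 := ⟨k - 1, by omega⟩
        have hlow' : ∀ j (hj : j < (pfx 0 t).length), j < k' → (pfx 0 t)[j] < h - b := by
          intro j hj hjk
          have hj1 : j + 1 < (pfx 0 (b :: t)).length := by
            rw [pfx_length] at hj ⊢; simpa using Nat.succ_lt_succ hj
          have := hlow (j + 1) hj1 (by omega)
          rw [pfx_getElem _ _ _ hj1] at this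
          rw [pfx_getElem _ _ _ hj]
          simp only [List.take_succ_cons, List.sum_cons] at this
          omega
        have hhigh' : ∀ j (hj : j < (pfx 0 t).length), k' ≤ j → h - b ≤ (pfx 0 t)[j] := by
          intro j hj hjk
          have hj1 : j + 1 < (pfx 0 (b :: t)).length := by
            rw [pfx_length] at hj ⊢; simpa using Nat.succ_lt_succ hj
          have := hhigh (j + 1) hj1 (by omega)
          rw [pfx_getElem _ _ _ hj1] at this
          rw [pfx_getElem _ _ _ hj]
          simp only [List.take_succ_cons, List.sum_cons] at this
          omega
        have := ih (h - b) k' (by simpa using hk) hlow' hhigh'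
        simp only [solveLin, if_neg hh, this]
        by_cases hkl : k' < t.length
        · rw [if_pos hkl, if_pos (by simpa using Nat.succ_lt_succ hkl)]
          push_cast; ring
        · rw [if_neg hkl, if_neg (by simp; omega)]
          simp only [List.sum_cons, List.length_cons, solveCeil]
          push_cast
          ring_nf

-- on a descending list, the elements above a threshold form exactly the initial segment
lemma filter_eq_takeWhile_of_desc (amax : Int) (l : List Int)
    (hd : l.Pairwise (fun a b : Int => b ≤ a)) :
    l.filter (fun b => decide (amax < b)) = l.takeWhile (fun b => decide (amax < b)) := by
  induction l with
  | nil => rfl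
  | cons a t ih =>
      rcases List.pairwise_cons.mp hd with ⟨ha, ht⟩
      by_cases hp : amax < a
      · simp [hp, ih ht]
      · push_neg at hp
        have hnil : t.filter (fun b => decide (amax < b)) = [] := by
          rw [List.filter_eq_nil_iff]
          intro x hx
          simp only [decide_eq_true_eq]
          have := ha x hx
          omega
        simp only [List.filter_cons, List.takeWhile_cons]
        simp only [show decide (amax < a) = false by simp [not_lt.mpr hp], hnil]
        simp

lemma sorted_filter_eq_takeWhile (amax : Int) (blist : List Int) :
    PySem.List.sorted (blist.filter (fun b => decide (amax < b))) (fun x => x) true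
      = (PySem.List.sorted blist (fun x => x) true).takeWhile (fun b => decide (amax < b)) := by
  have hs : (PySem.List.sorted blist (fun x => x) true).Pairwise (fun a b : Int => b ≤ a) :=
    PySem.List.sorted_pairwise_rev blist (fun x => x)
  have hfilter_take : (PySem.List.sorted blist (fun x => x) true).filter (fun b => decide (amax < b))
      = (PySem.List.sorted blist (fun x => x) true).takeWhile (fun b => decide (amax < b)) :=
    filter_eq_takeWhile_of_desc amax _ hs
  apply List.Perm.eq_of_pairwise (le := fun a b : Int => b ≤ a)
  · intro a b _ _ h1 h2; omega
  · exact PySem.List.sorted_pairwise_rev _ _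
  · rw [← hfilter_take]
    exact (hs.filter _)
  · rw [← hfilter_take]
    exact (PySem.List.sorted_perm _ _ _).trans ((PySem.List.sorted_perm blist _ _).filter _).symm

lemma head?_dropWhile_le (amax : Int) (l : List Int) (x : Int)
    (hx : (l.dropWhile (fun b => decide (amax < b))).head? = some x) : x ≤ amax := by
  have := List.head?_dropWhile_not (fun b : Int => decide (amax < b)) l
  rw [hx] at this
  simpa using this

-- ===== VERDICT (by name: the statement is the Claim_ definition above) =====
theorem solve_spec : Claim_equal_solve := by
  intro h_ alist blist _hdom hpre
  unfold Spec_solve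
  obtain ⟨x, hx, hxpos⟩ := hpre
  -- max(alist) exists and is positive
  rcases hmax : PySem.List.max? alist (fun y => y) with _ | amax
  · rw [PySem.List.max?_eq_none_iff] at hmax
    subst hmax
    exact absurd hx (List.not_mem_nil)
  have hamax : 0 < amax := lt_of_lt_of_le hxpos (PySem.List.max?_isMax hmax x hx)
  -- abbreviations
  set s := PySem.List.sorted blist (fun y => y) true with hs
  set t := s.takeWhile (fun b => decide (amax < b)) with ht
  have htmem : ∀ b ∈ t, amax < b := by
    intro b hb
    simpa using List.mem_takeWhile_imp hb
  have htpos : ∀ b ∈ t, 0 < b := fun b hb => lt_trans hamax (htmem b hb)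
  -- A's side: the loop consumes exactly the takeWhile segment
  have hA : solve h_ alist blist = 0 + solveLin amax t h_ := by
    rw [solve, hmax, ← hs]
    conv_lhs => rw [show s = t ++ s.dropWhile (fun b => decide (amax < b)) from
      List.takeWhile_append_dropWhile.symm]
    exact solveLoop_split amax t _ 0 h_ htmem
      (fun y hy => head?_dropWhile_le amax s y hy)
  -- B's side
  have hbigs : PySem.List.sorted (blist.filter (fun b => decide (amax < b))) (fun y => y) true = t :=
    sorted_filter_eq_takeWhile amax blist
  have hpre := solvePrefix_eq t 0 []
  have hplen : (pfx 0 t).length = t.length := pfx_length t 0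
  -- binary search finds a valid split index
  have hbs := solveBsearch_spec (pfx 0 t) h_ (pfx_pairwise_le t htpos 0) 0 (pfx 0 t).length
    (Nat.zero_le _) (le_refl _) (fun j hj hj0 => absurd hj0 (Nat.not_lt_zero j))
    (fun j hj hge => absurd hj (by omega))
  set k := solveBsearch (pfx 0 t) h_ 0 (pfx 0 t).length with hk
  have hlin := solveLin_eq amax t h_ k (by omega) hbs.2.2.1 hbs.2.2.2
  rw [hA, solve_alt, hmax]
  simp only [hbigs, hpre, List.nil_append, Int.zero_add, ← hk]
  rw [hlin]
  by_cases hkl : k < t.length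
  · rw [if_pos hkl, if_pos (by omega)]
  · rw [if_neg hkl, if_neg (by omega)]
    simp only [solveCeil, hplen]
    ring
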